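-- pv_equiv track=rewrite | github.com/pnnl/pyparticle | build/lib/PyParticle/viz/styling.py | get_linestyles
-- ===== SOURCE A (Python) =====
-- def get_linestyles(n: int):
--     """Return a cycling list of linestyles for `n` lines.
--
--     The list is deterministic and suitable for use in plotting functions.
--     """
--     base = ['-', '--', '-.', ':']
--     if n <= len(base):
--         return base[:n]
--     # repeat patterns if more lines are requested
--     out = []
--     i = 0
--     while len(out) < n:
--         out.append(base[i % len(base)])
--         i += 1
--     return out
-- ===== SOURCE B (Python) =====
-- def get_linestyles(n: int):
--     """Return a cycling list of linestyles for `n` lines.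
--
--     The list is deterministic and suitable for use in plotting functions.
--     """
--     base = ['-', '--', '-.', ':']
--     if n <= len(base):
--         return base[:n]
--     reps = n // len(base) + 1
--     return (base * reps)[:n]
-- ===== Notes on version B (the rewrite author's own statement) =====
-- stated objective: faster
-- what changed: The element-by-element while-loop with modulo indexing is replaced by a replicate-then-truncate construction: build base*(n//4+1) in one C-level list multiplication and slice to n.
import Mathlib
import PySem

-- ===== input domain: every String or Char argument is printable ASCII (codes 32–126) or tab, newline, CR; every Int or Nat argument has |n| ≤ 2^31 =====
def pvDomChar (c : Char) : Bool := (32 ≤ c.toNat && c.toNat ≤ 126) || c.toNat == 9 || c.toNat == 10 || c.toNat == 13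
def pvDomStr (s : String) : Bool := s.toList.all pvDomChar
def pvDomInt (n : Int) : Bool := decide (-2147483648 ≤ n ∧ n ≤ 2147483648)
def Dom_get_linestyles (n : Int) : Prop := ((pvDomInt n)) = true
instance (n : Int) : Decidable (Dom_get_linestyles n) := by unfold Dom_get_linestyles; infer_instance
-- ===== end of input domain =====

-- B replaces A's element-by-element while-loop (modulo indexing) by building base*(n//4+1) in one shot and slicing to n.

-- ===== PORT A =====
def pvBase : List String := ["-", "--", "-.", ":"]

-- the `while len(out) < n` loop of A; terminates because n - len(out) shrinks
def pvLoopA (n : Int) (out : List String) (i : Int) : List String :=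
  if (out.length : Int) < n then
    pvLoopA n (out ++ [PySem.List.pyGetD pvBase (PySem.Int.mod i 4) ""]) (i + 1)
  else out
termination_by (n - out.length).toNat
decreasing_by simp; omega

def get_linestyles (n : Int) : List String :=
  if n ≤ (pvBase.length : Int) then PySem.List.slice pvBase none (some n)
  else pvLoopA n [] 0

-- ===== PORT B =====
def get_linestyles_alt (n : Int) : List String :=
  if n ≤ (pvBase.length : Int) then PySem.List.slice pvBase none (some n)
  else
    let reps := PySem.Int.floordiv n (pvBase.length : Int) + 1
    PySem.List.slice (List.flatten (List.replicate reps.toNat pvBase)) none (some n)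

-- ===== PRECONDITION & SPEC =====
def Spec_get_linestyles (n : Int) (out : List String) : Prop := out = get_linestyles_alt n
instance (n : Int) (out : List String) : Decidable (Spec_get_linestyles n out) := by unfold Spec_get_linestyles; infer_instance

-- ===== CLAIM (what is proved, stated in full; the proofs are below) =====
def Claim_equal_get_linestyles : Prop := ∀ (n : Int), Dom_get_linestyles n → Spec_get_linestyles n (get_linestyles n)

-- ===== LEMMAS AND PROOFS =====

def pvF (j : Nat) : String := pvBase.getD (j % 4) ""

theorem pvLoopA_eq (n : Int) : ∀ (k : Nat) (out : List String) (i : Nat),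
    ((out.length : Int) + k = n) →
    pvLoopA n out (i : Int) = out ++ (List.range k).map (fun j => pvF (i + j)) := by
  intro k
  induction k with
  | zero =>
    intro out i h
    rw [pvLoopA]
    simp at h ⊢
    omega
  | succ k ih =>
    intro out i h
    rw [pvLoopA]
    have hlt : (out.length : Int) < n := by omega
    rw [if_pos hlt]
    have : ((i : Int)) + 1 = ((i + 1 : Nat) : Int) := by push_cast; ring
    rw [this, ih (out ++ [PySem.List.pyGetD pvBase (PySem.Int.mod (i : Int) 4) ""]) (i + 1) (by simp; omega)]
    have hmod : PySem.Int.mod (i : Int) 4 = ((i % 4 : Nat) : Int) := by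
      exact_mod_cast PySem.Int.mod_natCast i 4
    rw [hmod]
    simp [List.range_succ_eq_map, pvF, List.map_map, Function.comp]
    refine ⟨?_, ?_⟩
    · rw [show ((i:Int) % 4) = ((i % 4 : Nat) : Int) by omega, PySem.List.pyGetD_natCast]
      simp [List.getD]
    · intro a ha; congr 2; omega

theorem pvFlatten_replicate (r : Nat) :
    List.flatten (List.replicate r pvBase) = (List.range (4 * r)).map pvF := by
  induction r with
  | zero => simp
  | succ r ih =>
    have h4 : 4 * (r + 1) = 4 + 4 * r := by ring
    rw [List.replicate_succ, List.flatten_cons, ih, h4, List.range_add]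
    have hbase : (List.range 4).map pvF = pvBase := by decide
    rw [List.map_append, hbase, List.map_map]
    congr 1
    apply List.map_congr_left
    intro j hj
    simp only [Function.comp, pvF]
    congr 1
    omega

theorem get_linestyles_spec' (n : Int) : get_linestyles n = get_linestyles_alt n := by
  unfold get_linestyles get_linestyles_alt
  by_cases h : n ≤ (pvBase.length : Int)
  · rw [if_pos h, if_pos h]
  · rw [if_neg h, if_neg h]
    have hn : (0:Int) < n := by simp [pvBase] at h; omega
    have hto : n = ((n.toNat : Nat) : Int) := by omega
    have hA : pvLoopA n [] 0 = (List.range n.toNat).map pvF := by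
      have := pvLoopA_eq n n.toNat [] 0 (by simp; omega)
      simpa using this
    have hdiv : PySem.Int.floordiv n (pvBase.length : Int) + 1 = n / 4 + 1 := by
      have : (pvBase.length : Int) = 4 := by decide
      rw [this, PySem.Int.floordiv_eq_ediv_of_pos (by omega)]
    have hge : n.toNat ≤ 4 * (PySem.Int.floordiv n (pvBase.length : Int) + 1).toNat := by
      rw [hdiv]; omega
    rw [hA]
    show List.map pvF (List.range n.toNat) = PySem.List.slice (List.flatten (List.replicate (PySem.Int.floordiv n (pvBase.length : Int) + 1).toNat pvBase)) none (some n)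
    rw [pvFlatten_replicate]
    rw [hto, PySem.List.slice_to_natCast, ← List.map_take, List.take_range, ← hto]
    congr 2
    omega

-- ===== VERDICT (by name: the statement is the Claim_ definition above) =====
theorem get_linestyles_spec : Claim_equal_get_linestyles := by
  intro n _
  unfold Spec_get_linestyles
  exact get_linestyles_spec' n
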